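-- pv_equiv track=rewrite | github.com/cajigaslab/nSTAT-python | tools/notebooks/generate_helpfile_notebooks.py | _strip_matlab_comment
-- ===== SOURCE A (Python) =====
-- def _strip_matlab_comment(line: str) -> str:
--     in_single = False
--     out: list[str] = []
--     for ch in line:
--         if ch == "'" and not in_single:
--             in_single = True
--             out.append(ch)
--             continue
--         if ch == "'" and in_single:
--             in_single = False
--             out.append(ch)
--             continue
--         if ch == "%" and not in_single:
--             break
--         out.append(ch)
--     return "".join(out)
-- ===== SOURCE B (Python) =====
-- def _strip_matlab_comment(line: str) -> str:
--     parts = line.split("'")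
--     acc = []
--     for i, part in enumerate(parts):
--         if i % 2 == 0:
--             p = part.find("%")
--             if p != -1:
--                 acc.append(part[:p])
--                 return "'".join(acc)
--         acc.append(part)
--     return "'".join(acc)
-- ===== Notes on version B (the rewrite author's own statement) =====
-- stated objective: faster
-- what changed: Replaces the per-character in_single toggle loop with str.split on single quotes: only even-indexed (outside-quote) parts are searched for the comment marker with str.find, and the line is rejoined up to the first such marker.
import Mathlib
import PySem

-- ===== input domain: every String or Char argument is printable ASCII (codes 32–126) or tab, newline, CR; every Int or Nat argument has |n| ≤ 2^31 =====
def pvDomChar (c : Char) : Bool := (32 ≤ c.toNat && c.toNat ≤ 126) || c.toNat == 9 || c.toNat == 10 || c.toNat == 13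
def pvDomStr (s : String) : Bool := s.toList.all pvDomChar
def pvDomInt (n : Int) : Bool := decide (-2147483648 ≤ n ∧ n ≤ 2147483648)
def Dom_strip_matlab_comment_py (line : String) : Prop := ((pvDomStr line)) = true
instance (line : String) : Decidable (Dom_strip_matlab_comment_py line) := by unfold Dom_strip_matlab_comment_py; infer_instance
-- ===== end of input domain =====

-- B replaces A's per-character toggle loop with str.split on single quotes, scanning only the
-- even-indexed (outside-quote) parts for the comment marker (objective: faster, constant-factor).

-- ===== PORT A =====
-- char-by-char loop with the in_single toggle; 'break' = return the accumulated prefix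
def stripAGo : List Char → Bool → List Char
  | [], _ => []
  | c :: rest, ins =>
    if c = '\'' ∧ ¬ ins then c :: stripAGo rest true
    else if c = '\'' ∧ ins then c :: stripAGo rest false
    else if c = '%' ∧ ¬ ins then []
    else c :: stripAGo rest ins

def strip_matlab_comment_py (line : String) : String :=
  String.mk (stripAGo line.toList false)

-- ===== PORT B =====
-- hand port of str.split("'") over the character list (exact for the single-char separator)
def splitQuote : List Char → List (List Char)
  | [] => [[]]
  | c :: r =>
    if c = '\'' then [] :: splitQuote r
    else
      match splitQuote r with
      | [] => [[c]]
      | h :: t => (c :: h) :: t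

-- iterate over the parts; `even` tracks i % 2 == 0; the "'" re-inserted before each later part
-- plays the role of B's "'".join(acc)
def stripBGo : Bool → List (List Char) → List Char
  | _, [] => []
  | even, p :: rest =>
    let tail : List Char := match rest with
      | [] => []
      | _ => '\'' :: stripBGo (!even) rest
    if even then
      match p.findIdx? (· = '%') with   -- part.find("%")
      | some k => p.take k
      | none => p ++ tail
    else p ++ tail

def strip_matlab_comment_py_alt (line : String) : String :=
  String.mk (stripBGo true (splitQuote line.toList))

-- ===== PRECONDITION & SPEC =====
def Spec_strip_matlab_comment_py (line : String) (out : String) : Prop := out = strip_matlab_comment_py_alt line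
instance (line : String) (out : String) : Decidable (Spec_strip_matlab_comment_py line out) := by unfold Spec_strip_matlab_comment_py; infer_instance

-- ===== CLAIM (what is proved, stated in full; the proofs are below) =====
def Claim_equal_strip_matlab_comment_py : Prop := ∀ (line : String), Dom_strip_matlab_comment_py line → Spec_strip_matlab_comment_py line (strip_matlab_comment_py line)

-- ===== LEMMAS AND PROOFS =====

theorem splitQuote_ne_nil (l : List Char) : splitQuote l ≠ [] := by
  cases l with
  | nil => simp [splitQuote]
  | cons c r =>
    simp only [splitQuote]
    split
    · simp
    · cases h : splitQuote r <;> simp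

theorem stripA_eq_stripB (l : List Char) (ins : Bool) :
    stripAGo l ins = stripBGo (!ins) (splitQuote l) := by
  induction l generalizing ins with
  | nil => cases ins <;> simp [stripAGo, splitQuote, stripBGo]
  | cons c r ih =>
    by_cases hq : c = '\''
    · subst hq
      obtain ⟨h, t, hht⟩ : ∃ h t, splitQuote r = h :: t := by
        cases h : splitQuote r with
        | nil => exact absurd h (splitQuote_ne_nil r)
        | cons a b => exact ⟨a, b, rfl⟩
      cases ins with
      | false =>
        simp [stripAGo, splitQuote]
        rw [ih, hht]
        simp [stripBGo]
      | true =>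
        simp [stripAGo, splitQuote]
        rw [ih, hht]
        simp [stripBGo]
    · -- c ≠ '\''
      have hsplit : ∃ h t, splitQuote r = h :: t := by
        cases h : splitQuote r with
        | nil => exact absurd h (splitQuote_ne_nil r)
        | cons a b => exact ⟨a, b, rfl⟩
      obtain ⟨h, t, hht⟩ := hsplit
      have hsc : splitQuote (c :: r) = (c :: h) :: t := by
        simp [splitQuote, hq, hht]
      by_cases hp : c = '%'
      · subst hp
        cases ins with
        | false =>
          simp [stripAGo, hq, hsc, stripBGo, List.findIdx?_cons]
        | true =>
          -- inside a quote: '%' is an ordinary character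
          simp only [stripAGo, hq, hsc, stripBGo]
          norm_num
          rw [ih]
          rw [hht]
          cases t <;> simp [stripBGo]
      · cases ins with
        | false =>
          simp only [stripAGo, hq, hp, hsc, stripBGo]
          norm_num [hq, hp]
          rw [ih, hht]
          simp only [stripBGo, Bool.not_false, List.findIdx?_cons, hp]
          cases hfi : h.findIdx? (· = '%') with
          | some k => simp [List.take_succ_cons]
          | none => cases t <;> simp [stripBGo]
        | true =>
          simp only [stripAGo, hq, hp, hsc, stripBGo]
          norm_num [hq, hp]
          rw [ih, hht]
          cases t <;> simp [stripBGo]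

-- ===== VERDICT (by name: the statement is the Claim_ definition above) =====
theorem strip_matlab_comment_py_spec : Claim_equal_strip_matlab_comment_py := by
  intro line _
  unfold Spec_strip_matlab_comment_py strip_matlab_comment_py strip_matlab_comment_py_alt
  rw [stripA_eq_stripB]
  simp
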